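-- pv_equiv track=rewrite | github.com/Cyrilnkl/password_analyzer | analyzer.py | checkLowercase
-- ===== SOURCE A (Python) =====
-- def checkLowercase(password):
--     score = -4
--     counter = 0
--     lowercase_alphabet = [chr(i) for i in range(ord('a'), ord('z')+1)]
--
--     for i in range (0, len(password)):
--         if (password[i] in lowercase_alphabet):
--             counter+=1
--
--             if(score == -4): score+=4
--             elif(score == 0): score+=5
--             elif(score == 5): score+=5
--
--     if(counter == len(password)):
--         score = 0
--
--     return score
-- ===== SOURCE B (Python) =====
-- def checkLowercase(password):
--     # Delete the lowercase letters and look at what remains.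
--     rest = password.translate({c: None for c in range(ord('a'), ord('z') + 1)})
--     if not rest:
--         # nothing but lowercase letters (including the empty string)
--         return 0
--     c = len(password) - len(rest)
--     return (-4, 0, 5)[c] if c < 3 else 10
-- ===== Notes on version B (the rewrite author's own statement) =====
-- stated objective: faster
-- what changed: B deletes the lowercase letters with one str.translate pass and reasons about the remainder: an empty remainder is the all-lowercase override (early return 0), otherwise the lowercase count is recovered by length subtraction and turned into the score by tuple indexing, instead of A's per-index Python loop with a 26-element list membership test driving an in-loop score/counter state machine.
import Mathlib
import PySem

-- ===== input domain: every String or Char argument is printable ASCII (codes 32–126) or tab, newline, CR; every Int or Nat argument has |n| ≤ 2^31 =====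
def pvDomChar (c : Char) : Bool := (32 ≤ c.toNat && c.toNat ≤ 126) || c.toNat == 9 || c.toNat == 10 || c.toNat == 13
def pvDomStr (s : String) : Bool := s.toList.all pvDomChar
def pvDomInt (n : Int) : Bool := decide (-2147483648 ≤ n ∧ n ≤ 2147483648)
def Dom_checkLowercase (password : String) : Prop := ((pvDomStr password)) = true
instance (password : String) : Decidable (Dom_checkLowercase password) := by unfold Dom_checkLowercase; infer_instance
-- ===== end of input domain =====

-- B deletes the lowercase letters (translate), early-returns 0 on an empty remainder, and otherwise derives the score from the length difference by tuple indexing (objective: faster — measured).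


-- ===== PORT A =====
-- Literal port of A: build the 26-letter list, loop over indices with the score/counter state machine.
def checkLowercase (password : String) : Int :=
  let lowercaseAlphabet : List Char :=
    (PySem.List.pyRange 97 123 1).map (fun i => Char.ofNat i.toNat)
  let chars := password.toList
  let st :=
    (PySem.List.pyRange 0 (PySem.Str.len password) 1).foldl
      (fun (sc : Int × Int) i =>
        let ch := PySem.List.pyGetD chars i ' '
        if ch ∈ lowercaseAlphabet then
          let counter := sc.2 + 1
          let score :=
            if sc.1 = -4 then sc.1 + 4
            else if sc.1 = 0 then sc.1 + 5
            else if sc.1 = 5 then sc.1 + 5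
            else sc.1
          (score, counter)
        else sc)
      (-4, 0)
  if st.2 = PySem.Str.len password then 0 else st.1

-- ===== PORT B =====
-- Port of B: str.translate with a delete table for codepoints 97..122 keeps exactly the
-- characters whose codepoint is outside that range (exact on all inputs); `not rest` is
-- the empty test; the tuple index (-4,0,5)[c] is guarded by 0 ≤ c < 3, ported with pyGetD
-- (the default is unreachable since the index is in range).
def checkLowercase_alt (password : String) : Int :=
  let rest : List Char :=
    password.toList.filter (fun ch => !decide (97 ≤ ch.toNat ∧ ch.toNat ≤ 122))
  if rest = [] then 0
  else
    let c : Int := (password.toList.length : Int) - (rest.length : Int)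
    if c < 3 then PySem.List.pyGetD [-4, 0, 5] c 0 else 10

-- ===== PRECONDITION & SPEC =====
def Spec_checkLowercase (password : String) (out : Int) : Prop := out = checkLowercase_alt password
instance (password : String) (out : Int) : Decidable (Spec_checkLowercase password out) := by unfold Spec_checkLowercase; infer_instance

-- ===== CLAIM (what is proved, stated in full; the proofs are below) =====
def Claim_equal_checkLowercase : Prop := ∀ (password : String), Dom_checkLowercase password → Spec_checkLowercase password (checkLowercase password)

-- ===== LEMMAS AND PROOFS =====

def pvLow : List Char := (PySem.List.pyRange 97 123 1).map (fun i => Char.ofNat i.toNat)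

def pvP (ch : Char) : Bool := !decide (97 ≤ ch.toNat ∧ ch.toNat ≤ 122)

def pvG (k : Nat) : Int := if k = 0 then -4 else if k = 1 then 0 else if k = 2 then 5 else 10

def pvF : Int × Int → Char → Int × Int := fun sc ch =>
  if ch ∈ pvLow then
    (if sc.1 = -4 then sc.1 + 4
     else if sc.1 = 0 then sc.1 + 5
     else if sc.1 = 5 then sc.1 + 5
     else sc.1, sc.2 + 1)
  else sc

lemma pvToNat_ofNat (n : Nat) (h : 97 ≤ n) (h2 : n < 123) : (Char.ofNat n).toNat = n := by
  rw [Char.toNat_ofNat]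
  have hv : n.isValidChar := Or.inl (by omega)
  simp [hv]

lemma pvMem_low (ch : Char) : (ch ∈ pvLow) ↔ (97 ≤ ch.toNat ∧ ch.toNat ≤ 122) := by
  constructor
  · intro h
    simp only [pvLow, List.mem_map] at h
    obtain ⟨i, hi, rfl⟩ := h
    rw [PySem.List.mem_pyRange_one] at hi
    have h1 : 97 ≤ i.toNat := by omega
    have h2 : i.toNat < 123 := by omega
    rw [pvToNat_ofNat i.toNat h1 h2]
    omega
  · intro ⟨h1, h2⟩
    simp only [pvLow, List.mem_map]
    refine ⟨(ch.toNat : Int), ?_, ?_⟩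
    · rw [PySem.List.mem_pyRange_one]
      exact ⟨by omega, by omega⟩
    · rw [Int.toNat_natCast]
      exact Char.ofNat_toNat ch

lemma pvStep (k : Nat) :
    (if pvG k = -4 then pvG k + 4 else if pvG k = 0 then pvG k + 5 else if pvG k = 5 then pvG k + 5 else pvG k)
      = pvG (k + 1) := by
  match k with
  | 0 => decide
  | 1 => decide
  | 2 => decide
  | (n+3) => simp [pvG]

-- A's loop computes (pvG c, c) where c counts the characters failing pvP (the lowercase ones).
lemma pvLoop (l : List Char) (k : Nat) :
    l.foldl pvF (pvG k, (k : Int))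
      = (pvG (k + (l.filter (fun ch => !pvP ch)).length),
         ((k + (l.filter (fun ch => !pvP ch)).length : Nat) : Int)) := by
  induction l generalizing k with
  | nil => simp
  | cons ch t ih =>
    by_cases h : 97 ≤ ch.toNat ∧ ch.toNat ≤ 122
    · have hm : ch ∈ pvLow := (pvMem_low ch).mpr h
      have hp : (!pvP ch) = true := by simp [pvP, h]
      simp only [List.foldl_cons, pvF, if_pos hm, List.filter_cons, hp, if_pos]
      have h1 : ((k : Int) + 1) = ((k + 1 : Nat) : Int) := by push_cast; ring
      rw [pvStep k, h1, ih (k + 1)]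
      have hlen : k + 1 + (List.filter (fun ch => !pvP ch) t).length
          = k + (ch :: List.filter (fun ch => !pvP ch) t).length := by
        simp only [List.length_cons]; omega
      rw [hlen]
    · have hm : ch ∉ pvLow := fun hc => h ((pvMem_low ch).mp hc)
      have hp : (!pvP ch) = false := by simp [pvP, h]
      simp only [List.foldl_cons, pvF, if_neg hm, List.filter_cons, hp]
      simpa using ih k

lemma pvPartition (l : List Char) :
    (l.filter (fun ch => !pvP ch)).length + (l.filter pvP).length = l.length := by
  induction l with
  | nil => rfl
  | cons ch t ih =>
    simp only [List.filter_cons, List.length_cons]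
    cases hp : pvP ch <;> simp [hp] <;> omega

-- ===== VERDICT (by name: the statement is the Claim_ definition above) =====
theorem checkLowercase_spec : Claim_equal_checkLowercase := by
  intro password _
  unfold Spec_checkLowercase checkLowercase checkLowercase_alt
  simp only [PySem.Str.len_eq]
  rw [show ((fun (sc : Int × Int) i =>
        let ch := PySem.List.pyGetD password.toList i ' '
        if ch ∈ (PySem.List.pyRange 97 123 1).map (fun i => Char.ofNat i.toNat) then
          (if sc.1 = -4 then sc.1 + 4
           else if sc.1 = 0 then sc.1 + 5
           else if sc.1 = 5 then sc.1 + 5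
           else sc.1, sc.2 + 1)
        else sc)
      = fun (acc : Int × Int) j => pvF acc (PySem.List.pyGetD password.toList j ' ')) from rfl]
  rw [PySem.List.foldl_pyRange_zero_pyGetD' password.toList ' ' pvF (-4, 0)]
  rw [show ((-4 : Int), (0 : Int)) = (pvG 0, ((0 : Nat) : Int)) from rfl]
  rw [pvLoop password.toList 0]
  rw [show (fun ch => !decide (97 ≤ ch.toNat ∧ ch.toNat ≤ 122)) = pvP from rfl]
  have hpart := pvPartition password.toList
  set m := (password.toList.filter (fun ch => !pvP ch)).length with hm
  set r := password.toList.filter pvP with hr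
  simp only [Nat.zero_add]
  by_cases hrest : r = []
  · have hlen : m = password.toList.length := by
      have : r.length = 0 := by rw [hrest]; rfl
      omega
    simp [hrest, hlen]
  · have hrl : 0 < r.length := List.length_pos_of_ne_nil hrest
    have hne : ((m : Int)) ≠ ((password.toList.length : Nat) : Int) := by
      intro hc; omega
    have hc : ((password.toList.length : Int) - (r.length : Int)) = (m : Int) := by omega
    simp only [hrest, if_false, hne, hc]
    match hmv : m with
    | 0 => simp [pvG, PySem.List.pyGetD]
    | 1 => simp [pvG, PySem.List.pyGetD]
    | 2 => simp [pvG, PySem.List.pyGetD]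
    | (n+3) =>
      have hg : pvG (n+3) = 10 := by simp [pvG]
      have hlt : ¬ (((n+3 : Nat) : Int) < 3) := by push_cast; omega
      rw [hg]; simp only [hlt, if_false]
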